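-- pv_equiv track=rewrite | github.com/kkb00714/Basic-Coding-Test | 프로그래머스/unrated/181918. 배열 만들기 4/배열 만들기 4.py | solution
-- ===== SOURCE A (Python) =====
-- def solution(arr):
--     stk = []
--     i = 0
--
--     while i < len(arr):
--         if not stk:
--         # stk 가 비어있으면 True를 반환 = 아래 코드 실행
--             stk.append(arr[i])
--             i += 1
--
--         elif stk and stk[-1] < arr[i]:
--             stk.append(arr[i])
--             i += 1
--
--         elif stk and stk[-1] >= arr[i]:
--             stk.pop()
--
--     return stk
-- ===== SOURCE B (Python) =====
-- def solution(arr):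
--     # An element survives A's stack process iff it is strictly smaller than
--     # every element after it; collect those with one reverse running-min scan.
--     res = []
--     cur = None
--     for x in reversed(arr):
--         if cur is None or x < cur:
--             res.append(x)
--             cur = x
--     res.reverse()
--     return res
-- ===== Notes on version B (the rewrite author's own statement) =====
-- stated objective: alternative
-- what changed: Replaces the forward monotonic stack with pops by a single right-to-left running-minimum scan: an element of arr survives exactly when it is smaller than every element after it, so B keeps x iff x < current suffix minimum and never pops.
import Mathlib
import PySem

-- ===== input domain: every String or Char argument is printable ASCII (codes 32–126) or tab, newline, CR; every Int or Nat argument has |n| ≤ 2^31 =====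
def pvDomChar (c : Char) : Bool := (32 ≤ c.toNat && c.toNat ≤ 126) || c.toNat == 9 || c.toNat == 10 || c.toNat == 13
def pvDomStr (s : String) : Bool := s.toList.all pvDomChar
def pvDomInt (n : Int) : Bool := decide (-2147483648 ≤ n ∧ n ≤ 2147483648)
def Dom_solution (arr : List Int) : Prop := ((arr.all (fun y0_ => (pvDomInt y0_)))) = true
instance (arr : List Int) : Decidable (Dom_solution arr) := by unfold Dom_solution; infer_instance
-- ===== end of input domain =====

-- B replaces A's forward monotonic stack (with pops) by one right-to-left running-minimum scan: x survives iff x < min of its suffix.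


-- ===== PORT A =====
-- while-loop of A: state (stk, i); pushes advance i, a pop keeps i (the element is re-tested).
def solutionGo (arr : List Int) (stk : List Int) (i : Nat) : List Int :=
  if h : i < arr.length then
    if hs : stk = [] then
      solutionGo arr (stk ++ [arr[i]]) (i + 1)
    else if stk.getLast hs < arr[i] then
      solutionGo arr (stk ++ [arr[i]]) (i + 1)
    else
      solutionGo arr stk.dropLast i
  else stk
termination_by 2 * (arr.length - i) + stk.length
decreasing_by
  · simp [List.length_append]; omega
  · simp [List.length_append]; omega
  · have : stk.dropLast.length < stk.length := by
      cases stk with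
      | nil => exact absurd rfl hs
      | cons a t => simp
    omega

def solution (arr : List Int) : List Int := solutionGo arr [] 0

-- ===== PORT B =====
-- one step of B's for-loop over reversed(arr): state (res, cur), cur = running minimum
def solStep (p : List Int × Option Int) (x : Int) : List Int × Option Int :=
  match p.2 with
  | none => (p.1 ++ [x], some x)
  | some c => if x < c then (p.1 ++ [x], some x) else p

def solution_alt (arr : List Int) : List Int :=
  ((arr.reverse.foldl solStep ([], none)).1).reverse

-- ===== PRECONDITION & SPEC =====
def Spec_solution (arr : List Int) (out : List Int) : Prop := out = solution_alt arr
instance (arr : List Int) (out : List Int) : Decidable (Spec_solution arr out) := by unfold Spec_solution; infer_instance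

-- ===== CLAIM (what is proved, stated in full; the proofs are below) =====
def Claim_equal_solution : Prop := ∀ (arr : List Int), Dom_solution arr → Spec_solution arr (solution arr)

-- ===== LEMMAS AND PROOFS =====

-- the common characterisation: x is kept iff it is < every element after it
def R : List Int → List Int
  | [] => []
  | x :: xs => if xs.all (fun z => decide (x < z)) then x :: R xs else R xs

-- drain (the effect of A's pop branch run to completion on one element)
def drain (x : Int) (stk : List Int) : List Int :=
  if h : stk ≠ [] then
    if x ≤ stk.getLast h then drain x stk.dropLast else stk
  else stk
termination_by stk.length
decreasing_by
  cases stk with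
  | nil => exact absurd rfl h
  | cons a t => simp

theorem drain_filter (x : Int) :
    ∀ s : List Int, s.Pairwise (· < ·) → drain x s = s.filter (fun y => decide (y < x)) := by
  intro s
  induction s using List.reverseRecOn with
  | nil => intro _; simp [drain]
  | append_singleton l a ih =>
    intro hp
    rw [List.pairwise_append] at hp
    obtain ⟨hl, -, hlt⟩ := hp
    by_cases hx : x ≤ a
    · have h1 : drain x (l ++ [a]) = drain x l := by
        rw [drain]; simp [hx]
      rw [h1, ih hl, List.filter_append]
      have : ¬ (a < x) := by omega
      simp [this]
    · have h1 : drain x (l ++ [a]) = l ++ [a] := by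
        rw [drain]; simp [hx]
      rw [h1]
      refine (List.filter_eq_self.mpr ?_).symm
      intro y hy
      rcases List.mem_append.mp hy with h | h
      · have hya : y < a := hlt y h a (by simp)
        simp; omega
      · simp at h; subst h; simp; omega

theorem filter_pairwise_lt (x : Int) (s : List Int) (hp : s.Pairwise (· < ·)) :
    (s.filter (fun y => decide (y < x)) ++ [x]).Pairwise (· < ·) := by
  rw [List.pairwise_append]
  refine ⟨hp.sublist List.filter_sublist, List.pairwise_singleton _ _, ?_⟩
  intro y hy z hz
  simp at hz; subst hz
  have := (List.mem_filter.mp hy).2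
  simpa using this

theorem foldl_drain_eq (xs : List Int) :
    ∀ s : List Int, s.Pairwise (· < ·) →
      xs.foldl (fun st x => drain x st ++ [x]) s =
        s.filter (fun y => xs.all (fun z => decide (y < z))) ++ R xs := by
  induction xs with
  | nil => intro s _; simp [R]
  | cons x t ih =>
    intro s hp
    simp only [List.foldl_cons]
    rw [drain_filter x s hp, ih _ (filter_pairwise_lt x s hp)]
    rw [List.filter_append, List.filter_filter]
    simp only [R, List.all_cons]
    by_cases hc : t.all (fun z => decide (x < z)) = true
    · simp [hc, Bool.and_comm]
    · simp [hc, Bool.and_comm]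

theorem solutionGo_eq (arr stk : List Int) (i : Nat) :
    solutionGo arr stk i = (arr.drop i).foldl (fun s x => drain x s ++ [x]) stk := by
  induction stk, i using solutionGo.induct arr with
  | case1 i h ih =>
    rw [solutionGo, dif_pos h, dif_pos rfl, List.drop_eq_getElem_cons h]
    simp only [List.foldl_cons, List.nil_append]
    rw [show drain arr[i] [] = [] from by simp [drain]]
    simpa using ih
  | case2 stk i h hs hlt ih =>
    rw [solutionGo, dif_pos h, dif_neg hs, if_pos hlt, List.drop_eq_getElem_cons h]
    simp only [List.foldl_cons]
    have : drain arr[i] stk = stk := by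
      rw [drain]; simp [hs]; omega
    rw [this]
    exact ih
  | case3 stk i h hs hlt ih =>
    rw [solutionGo, dif_pos h, dif_neg hs, if_neg hlt, ih, List.drop_eq_getElem_cons h]
    simp only [List.foldl_cons]
    have : drain arr[i] stk = drain arr[i] stk.dropLast := by
      conv_lhs => rw [drain]
      simp [hs]; omega
    rw [this]
  | case4 stk i h =>
    rw [solutionGo, dif_neg h, List.drop_eq_nil_of_le (Nat.le_of_not_lt h)]
    rfl

theorem solution_eq_R (arr : List Int) : solution arr = R arr := by
  rw [solution, solutionGo_eq]
  simpa using foldl_drain_eq arr [] List.Pairwise.nil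

-- B-side invariant: res is the reversed survivors of the reversed prefix, cur its minimum
theorem alt_inv : ∀ l : List Int,
    (l.foldl solStep ([], none)).1 = (R l.reverse).reverse ∧
    ((l.foldl solStep ([], none)).2 = none ↔ l = []) ∧
    (∀ c : Int, (l.foldl solStep ([], none)).2 = some c → c ∈ l ∧ ∀ y ∈ l, c ≤ y) := by
  intro l
  induction l using List.reverseRecOn with
  | nil => simp [R]
  | append_singleton l x ih =>
    obtain ⟨h1, h2, h3⟩ := ih
    rw [List.foldl_append, List.foldl_cons, List.foldl_nil]
    have hcond : (∀ y ∈ l, x < y) ↔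
        ((l.foldl solStep ([], none)).2 = none ∨
          ∃ c, (l.foldl solStep ([], none)).2 = some c ∧ x < c) := by
      constructor
      · intro hall
        cases hm : (l.foldl solStep ([], none)).2 with
        | none => exact Or.inl rfl
        | some c => exact Or.inr ⟨c, rfl, hall c (h3 c hm).1⟩
      · rintro (hn | ⟨c, hc, hxc⟩) y hy
        · exact absurd hy (by simp [h2.mp hn])
        · exact lt_of_lt_of_le hxc ((h3 c hc).2 y hy)
    have hR : R ((l ++ [x]).reverse) =
        if l.reverse.all (fun z => decide (x < z)) then x :: R l.reverse else R l.reverse := by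
      simp [R]
    have hall : l.reverse.all (fun z => decide (x < z)) = true ↔ ∀ y ∈ l, x < y := by
      simp [List.all_eq_true]
    cases hm : (l.foldl solStep ([], none)).2 with
    | none =>
      have hl : l = [] := h2.mp hm
      subst hl
      refine ⟨?_, by simp [solStep], ?_⟩
      · rw [hR]; simp [solStep, R]
      · intro c hc; simp [solStep] at hc; subst hc; simp
    | some c =>
      obtain ⟨hcm, hcmin⟩ := h3 c hm
      by_cases hx : x < c
      · have hkeep : ∀ y ∈ l, x < y := hcond.mpr (Or.inr ⟨c, hm, hx⟩)
        refine ⟨?_, by simp [solStep, hm, hx], ?_⟩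
        · rw [hR, if_pos (hall.mpr hkeep)]
          simp [solStep, hm, hx, h1]
        · intro d hd
          simp [solStep, hm, hx] at hd; subst hd
          refine ⟨by simp, ?_⟩
          intro y hy
          rcases List.mem_append.mp hy with h | h
          · exact le_of_lt (hkeep y h)
          · simp at h; omega
      · have hdrop : ¬ ∀ y ∈ l, x < y := by
          intro hall'
          rcases hcond.mp hall' with hn | ⟨c', hc', hxc'⟩
          · rw [hm] at hn; cases hn
          · rw [hm] at hc'; injection hc' with e; omega
        refine ⟨?_, by simp [solStep, hm, hx], ?_⟩
        · rw [hR, if_neg (by simpa [hall] using hdrop)]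
          simp [solStep, hm, hx, h1]
        · intro d hd
          simp [solStep, hm, hx] at hd; subst hd
          refine ⟨List.mem_append.mpr (Or.inl hcm), ?_⟩
          intro y hy
          rcases List.mem_append.mp hy with h | h
          · exact hcmin y h
          · simp at h; omega

theorem solution_alt_eq_R (arr : List Int) : solution_alt arr = R arr := by
  rw [solution_alt, (alt_inv arr.reverse).1]
  simp

-- ===== VERDICT (by name: the statement is the Claim_ definition above) =====
theorem solution_spec : Claim_equal_solution := by
  intro arr _
  show solution arr = solution_alt arr
  rw [solution_eq_R, solution_alt_eq_R]
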